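-- pv_equiv track=rewrite | github.com/mbollmann/levenshtein | scripts/conv_norm.py | revert_conversion
-- ===== SOURCE A (Python) =====
-- Begin_TOKEN = "__begin__"
--
-- KEEP_LABEL = "__KEEP__"
--
-- def revert_conversion(data, epsilon):
--     def make_output(l, r):
--         if r == epsilon:
--             return ""
--         elif r == KEEP_LABEL:
--             return l
--         else:
--             return r
--
--     input_token, output_token = None, None
--     for (lhs, rhs) in data:
--         if lhs.lower() == Begin_TOKEN:
--             if input_token:
--                 yield (input_token, output_token)
--             input_token = ""
--             output_token = make_output(lhs, rhs)
--         else: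
--             if lhs != epsilon:
--                 input_token += lhs
--             output_token += make_output(lhs, rhs)
--     if input_token:
--         yield (input_token, output_token)
-- ===== SOURCE B (Python) =====
-- Begin_TOKEN = "__begin__"
--
-- KEEP_LABEL = "__KEEP__"
--
-- def revert_conversion(data, epsilon):
--     def make_output(l, r):
--         return "" if r == epsilon else (l if r == KEEP_LABEL else r)
--
--     # pass 1: split the token sequence into segments, one per begin-token
--     groups = []
--     for lhs, rhs in data:
--         if lhs.lower() == Begin_TOKEN:
--             groups.append([(lhs, rhs)])
--         else:
--             groups[-1].append((lhs, rhs))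
--     # pass 2: map each segment to an (input, output) pair
--     for (blhs, brhs), *rest in groups:
--         input_token = "".join(l for l, r in rest if l != epsilon)
--         output_token = make_output(blhs, brhs) + "".join(make_output(l, r) for l, r in rest)
--         if input_token:
--             yield (input_token, output_token)
-- ===== Notes on version B (the rewrite author's own statement) =====
-- stated objective: alternative
-- what changed: Replaces A's single stateful scan (mutable input/output accumulators with a None sentinel and inline yields) by two passes: first split the sequence into begin-delimited segments, then map each segment independently to its (input, output) pair via joins.
import Mathlib
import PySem

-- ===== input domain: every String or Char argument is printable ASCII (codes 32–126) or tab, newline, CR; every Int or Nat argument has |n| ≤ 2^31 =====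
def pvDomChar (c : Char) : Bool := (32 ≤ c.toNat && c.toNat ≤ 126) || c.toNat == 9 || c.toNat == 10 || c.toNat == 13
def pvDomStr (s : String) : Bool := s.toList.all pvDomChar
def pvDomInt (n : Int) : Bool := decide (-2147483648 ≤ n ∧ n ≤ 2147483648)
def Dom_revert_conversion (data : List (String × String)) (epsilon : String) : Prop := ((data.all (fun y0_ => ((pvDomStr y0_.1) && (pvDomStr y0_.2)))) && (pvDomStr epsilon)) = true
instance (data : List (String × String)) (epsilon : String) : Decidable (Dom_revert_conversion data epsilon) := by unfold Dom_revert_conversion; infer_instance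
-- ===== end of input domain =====

-- B regroups the pairs in two passes (split into begin-delimited segments, then map each
-- segment to its pair) instead of A's single stateful scan; equal return values on Pre_,
-- where A (a generator, fully consumed) returns without raising.

-- ===== PORT A =====
-- shared helper: the inner make_output of both Pythons (identical in Source A and Source B)
def pvMakeOutput (epsilon l r : String) : String :=
  if r = epsilon then "" else if r = "__KEEP__" then l else r

-- A's single loop, state = input_token/output_token (none = Python's None sentinel);
-- yields become list elements in yield order; the 'none' else-branch is where the
-- Python raises TypeError (excluded by Pre_), the port just skips there.
def pvALoop (epsilon : String) (cur : Option (String × String)) :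
    List (String × String) → List (String × String)
  | [] =>
      match cur with
      | some (i, o) => if i ≠ "" then [(i, o)] else []
      | none => []
  | (lhs, rhs) :: rest =>
      if PySem.Str.lower lhs = "__begin__" then
        (match cur with
         | some (i, o) => if i ≠ "" then [(i, o)] else []
         | none => []) ++ pvALoop epsilon (some ("", pvMakeOutput epsilon lhs rhs)) rest
      else
        match cur with
        | some (i, o) =>
            pvALoop epsilon
              (some ((if lhs ≠ epsilon then i ++ lhs else i), o ++ pvMakeOutput epsilon lhs rhs)) rest
        | none => pvALoop epsilon none rest

def revert_conversion (data : List (String × String)) (epsilon : String) : List (String × String) :=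
  pvALoop epsilon none data

-- ===== PORT B =====
-- pass 1 step: groups kept newest-first, each group reversed (the port's encoding of
-- Python's append-at-end); the empty-st else-branch is Python's IndexError (outside Pre_).
def pvBStep (st : List (List (String × String))) (p : String × String) :
    List (List (String × String)) :=
  if PySem.Str.lower p.1 = "__begin__" then [p] :: st
  else
    match st with
    | [] => []
    | g :: t => (p :: g) :: t

-- pass 2: one segment (begin pair first) to its optional (input, output) pair
def pvBPair (epsilon : String) (g : List (String × String)) : Option (String × String) :=
  match g with
  | [] => none
  | b :: rest =>
      let input := PySem.Str.join "" ((rest.filter (fun p => p.1 ≠ epsilon)).map Prod.fst)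
      let output := pvMakeOutput epsilon b.1 b.2 ++
        PySem.Str.join "" (rest.map (fun p => pvMakeOutput epsilon p.1 p.2))
      if input ≠ "" then some (input, output) else none

def revert_conversion_alt (data : List (String × String)) (epsilon : String) : List (String × String) :=
  (((data.foldl pvBStep []).reverse.map List.reverse).filterMap (pvBPair epsilon))

-- ===== PRECONDITION & SPEC =====
-- Pre_ excludes exactly the inputs where a pair precedes every begin-token: there the
-- Python A raises TypeError (None + str) when consumed, returning no value.
def Pre_revert_conversion (data : List (String × String)) (epsilon : String) : Prop :=
  data = [] ∨ PySem.Str.lower (data.headI.1) = "__begin__"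
instance (data : List (String × String)) (epsilon : String) : Decidable (Pre_revert_conversion data epsilon) := by unfold Pre_revert_conversion; infer_instance

def pvWitness_revert_conversion : (List (String × String)) × String :=
  ([("__begin__", "x"), ("a", "__KEEP__"), ("e", "b")], "e")

def Spec_revert_conversion (data : List (String × String)) (epsilon : String) (out : List (String × String)) : Prop := out = revert_conversion_alt data epsilon
instance (data : List (String × String)) (epsilon : String) (out : List (String × String)) : Decidable (Spec_revert_conversion data epsilon out) := by unfold Spec_revert_conversion; infer_instance

-- ===== CLAIM (what is proved, stated in full; the proofs are below) =====
def Claim_equal_revert_conversion : Prop := ∀ (data : List (String × String)) (epsilon : String), Dom_revert_conversion data epsilon → Pre_revert_conversion data epsilon → Spec_revert_conversion data epsilon (revert_conversion data epsilon)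

-- ===== LEMMAS AND PROOFS =====

theorem pvCharsJoin_nil_flatten : ∀ (l : List (List Char)), PySem.Chars.join [] l = l.flatten
  | [] => by simp [PySem.Chars.join_nil]
  | [a] => by simp [PySem.Chars.join_singleton]
  | a :: b :: t => by
      rw [PySem.Chars.join_cons_cons]
      simp [pvCharsJoin_nil_flatten (b :: t)]

theorem pvJoin_nil : PySem.Str.join "" ([] : List String) = "" := by
  apply String.toList_injective; simp

theorem pvJoin_snoc (l : List String) (s : String) :
    PySem.Str.join "" (l ++ [s]) = PySem.Str.join "" l ++ s := by
  apply String.toList_injective; simp [pvCharsJoin_nil_flatten]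

-- B's current-segment input/output as strings (what pvBPair computes on b :: g)
def pvInp (epsilon : String) (g : List (String × String)) : String :=
  PySem.Str.join "" ((g.filter (fun p => p.1 ≠ epsilon)).map Prod.fst)
def pvOut (epsilon : String) (b : String × String) (g : List (String × String)) : String :=
  pvMakeOutput epsilon b.1 b.2 ++ PySem.Str.join "" (g.map (fun p => pvMakeOutput epsilon p.1 p.2))

theorem pvInp_snoc (epsilon : String) (g : List (String × String)) (p : String × String) :
    pvInp epsilon (g ++ [p]) = if p.1 ≠ epsilon then pvInp epsilon g ++ p.1 else pvInp epsilon g := by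
  unfold pvInp
  by_cases h : p.1 = epsilon <;> simp [h, List.filter_append, pvJoin_snoc]

theorem pvOut_snoc (epsilon : String) (b p : String × String) (g : List (String × String)) :
    pvOut epsilon b (g ++ [p]) = pvOut epsilon b g ++ pvMakeOutput epsilon p.1 p.2 := by
  unfold pvOut
  simp [pvJoin_snoc, String.append_assoc]

theorem pvBPair_cons (epsilon : String) (b : String × String) (g : List (String × String)) :
    pvBPair epsilon (b :: g) =
      if pvInp epsilon g ≠ "" then some (pvInp epsilon g, pvOut epsilon b g) else none := by
  simp [pvBPair, pvInp, pvOut]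

theorem pvMain (epsilon : String) (rest : List (String × String)) :
    ∀ (g : List (String × String)) (b : String × String) (gs : List (List (String × String))),
    PySem.Str.lower b.1 = "__begin__" →
    (((List.foldl pvBStep ((g.reverse ++ [b]) :: gs) rest).reverse.map List.reverse).filterMap (pvBPair epsilon))
      = ((gs.reverse.map List.reverse).filterMap (pvBPair epsilon))
        ++ pvALoop epsilon (some (pvInp epsilon g, pvOut epsilon b g)) rest := by
  induction rest with
  | nil =>
      intro g b gs hb
      simp [pvALoop, List.filterMap_append, List.filterMap_cons, pvBPair_cons]
      by_cases hi : pvInp epsilon g = "" <;> simp [hi]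
  | cons p rest ih =>
      intro g b gs hb
      obtain ⟨lhs, rhs⟩ := p
      by_cases h : PySem.Str.lower lhs = "__begin__"
      · have step : pvBStep ((g.reverse ++ [b]) :: gs) (lhs, rhs)
            = (([] : List (String × String)).reverse ++ [(lhs, rhs)]) :: ((g.reverse ++ [b]) :: gs) := by
          simp [pvBStep, h]
        rw [List.foldl_cons, step, ih [] (lhs, rhs) ((g.reverse ++ [b]) :: gs) h]
        have h1 : pvInp epsilon ([] : List (String × String)) = "" := by
          simp [pvInp, pvJoin_nil]
        have h2 : pvOut epsilon (lhs, rhs) ([] : List (String × String)) = pvMakeOutput epsilon lhs rhs := by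
          simp [pvOut, pvJoin_nil]
        rw [h1, h2]
        simp only [pvALoop, h, if_pos]
        simp [List.filterMap_append, List.append_assoc, List.filterMap_cons, pvBPair_cons]
        by_cases hi : pvInp epsilon g = "" <;> simp [hi]
      · have step : pvBStep ((g.reverse ++ [b]) :: gs) (lhs, rhs)
            = (((g ++ [(lhs, rhs)]).reverse ++ [b]) :: gs) := by
          simp [pvBStep, h]
        rw [List.foldl_cons, step, ih (g ++ [(lhs, rhs)]) b gs hb, pvInp_snoc, pvOut_snoc]
        simp [pvALoop, h]

-- ===== VERDICT (by name: the statement is the Claim_ definition above) =====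
theorem revert_conversion_spec : Claim_equal_revert_conversion := by
  intro data epsilon _ hpre
  unfold Spec_revert_conversion revert_conversion revert_conversion_alt
  cases data with
  | nil => simp [pvALoop]
  | cons p rest =>
      obtain ⟨lhs, rhs⟩ := p
      have hb : PySem.Str.lower lhs = "__begin__" := by
        rcases hpre with h | h
        · exact absurd h (by simp)
        · simpa using h
      have step : pvBStep [] (lhs, rhs)
          = (([] : List (String × String)).reverse ++ [(lhs, rhs)]) :: [] := by
        simp [pvBStep, hb]
      rw [List.foldl_cons, step, pvMain epsilon rest [] (lhs, rhs) [] hb]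
      have h1 : pvInp epsilon ([] : List (String × String)) = "" := by simp [pvInp, pvJoin_nil]
      have h2 : pvOut epsilon (lhs, rhs) ([] : List (String × String)) = pvMakeOutput epsilon lhs rhs := by
        simp [pvOut, pvJoin_nil]
      rw [h1, h2]
      simp [pvALoop, hb]
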